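-- pv_equiv track=rewrite | github.com/HyoTaek-Jang/Algorithm_Basic | Programmers/2022 kakao/신고 결과 받기.py | solution
-- ===== SOURCE A (Python) =====
-- def solution(id_list, report, k):
--     table = {}
--     temp = {}
--     for user in id_list:
--         table[user] = set()
--         temp[user] = 0
--
--     for cur in report:
--         user, reported = cur.split(" ")
--         table[reported].add(user)
--
--     for key in table:
--         if len(table[key]) >= k:
--             for i in table[key]:
--                 temp[i] += 1
--
--     answer = []
--     for key in table:
--         answer.append(temp[key])
--
--     return answer
-- ===== SOURCE B (Python) =====
-- def solution(id_list, report, k):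
--     # Sort the distinct (reported, reporter) pairs by reported id, then sweep the
--     # sorted list once: each contiguous run is one target's reporters, and a run
--     # of length >= k credits every reporter in it.
--     seen = {tuple(cur.split(" ")) for cur in report}
--     pairs = sorted(((reported, user) for user, reported in seen), key=lambda p: p[0])
--     counts = dict.fromkeys(id_list, 0)
--     while pairs:
--         key = pairs[0][0]
--         j = 0
--         while j < len(pairs) and pairs[j][0] == key:
--             j += 1
--         run, pairs = pairs[:j], pairs[j:]
--         if len(run) >= k:
--             for _, user in run:
--                 counts[user] += 1
--     return list(counts.values())
-- ===== Notes on version B (the rewrite author's own statement) =====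
-- stated objective: alternative
-- what changed: B replaces A's hash grouping (a reported->set-of-reporters table whose groups are then distributed) by sort-then-scan: the distinct (reported, reporter) pairs are sorted by reported id and swept once, each contiguous run being one target's reporters, credited when the run length reaches k.
-- outside the precondition, e.g. on solution(['a'], ['x a'], 2): A returns [0], B returns [0]
import Mathlib
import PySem

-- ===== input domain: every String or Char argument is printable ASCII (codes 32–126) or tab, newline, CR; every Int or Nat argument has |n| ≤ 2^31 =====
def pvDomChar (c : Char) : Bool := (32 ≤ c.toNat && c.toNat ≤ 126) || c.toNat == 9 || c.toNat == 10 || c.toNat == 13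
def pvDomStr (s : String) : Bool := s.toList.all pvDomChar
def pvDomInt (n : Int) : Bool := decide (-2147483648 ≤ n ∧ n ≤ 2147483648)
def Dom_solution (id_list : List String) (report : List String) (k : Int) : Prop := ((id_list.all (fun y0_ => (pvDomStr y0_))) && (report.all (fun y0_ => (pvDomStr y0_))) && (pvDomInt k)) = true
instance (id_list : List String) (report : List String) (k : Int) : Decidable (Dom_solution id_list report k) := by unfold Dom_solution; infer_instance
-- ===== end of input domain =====

-- B replaces A's hash grouping (reported -> set of reporters, then a nested distribution
-- loop over each group) by sort-then-scan: the distinct (reported, reporter) pairs are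
-- sorted by reported id and swept once; each contiguous run is one target's reporters.

-- `user, reported = cur.split(" ")` — exact when the split yields exactly two parts (guaranteed by Pre_)
def pvSplit2 (cur : String) : String × String :=
  let parts := (PySem.Str.split? cur " ").getD []
  (parts.getD 0 "", parts.getD 1 "")

-- ===== PORT A =====
-- `table[reported].add(user)` / `temp[i] += 1` raise KeyError on unregistered ids; those inputs lie
-- outside Pre_, there the port totalises with Dict.modify's default.
def solution (id_list : List String) (report : List String) (k : Int) : List Int :=
  let init : PySem.Dict String (PySem.Set String) × PySem.Dict String Int :=
    id_list.foldl (fun td user => (td.1.insert user PySem.Set.empty, td.2.insert user (0 : Int)))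
      (PySem.Dict.empty, PySem.Dict.empty)
  let table : PySem.Dict String (PySem.Set String) :=
    report.foldl (fun t cur =>
      t.modify (pvSplit2 cur).2 PySem.Set.empty (fun s => PySem.Set.add s (pvSplit2 cur).1)) init.1
  let temp : PySem.Dict String Int :=
    table.keys.foldl (fun tm key =>
      if k ≤ PySem.Set.len (table.getD key PySem.Set.empty) then
        (table.getD key PySem.Set.empty).foldl (fun tm i => tm.modify i 0 (fun x => x + 1)) tm
      else tm) init.2
  table.keys.foldl (fun answer key => answer ++ [temp.getD key 0]) []

-- ===== PORT B =====
-- the outer `while pairs:` loop; the inner `while j < len(pairs) and pairs[j][0] == key` scan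
-- with `run, pairs = pairs[:j], pairs[j:]` is exactly the span takeWhile/dropWhile of the head key
def pvRunScan (k : Int) : List (String × String) → PySem.Dict String Int → PySem.Dict String Int
  | [], counts => counts
  | p :: ps, counts =>
    let run := (p :: ps).takeWhile (fun q => q.1 == p.1)
    let counts' := if k ≤ (run.length : Int) then
        run.foldl (fun d q => d.modify q.2 0 (fun x => x + 1)) counts
      else counts
    pvRunScan k ((p :: ps).dropWhile (fun q => q.1 == p.1)) counts'
termination_by l _ => l.length
decreasing_by
  simp only [List.dropWhile_cons, beq_self_eq_true, if_true, List.length_cons]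
  exact Nat.lt_succ_of_le (List.length_dropWhile_le _ _)

def solution_alt (id_list : List String) (report : List String) (k : Int) : List Int :=
  let seen : PySem.Set (String × String) :=
    PySem.Set.ofList (report.map (fun cur => pvSplit2 cur))
  let pairs : List (String × String) :=
    PySem.List.sorted (seen.map (fun p => (p.2, p.1))) (fun p => p.1)
  let counts0 : PySem.Dict String Int :=
    id_list.foldl (fun d u => d.insert u (0 : Int)) PySem.Dict.empty
  (pvRunScan k pairs counts0).values

-- ===== PRECONDITION & SPEC =====
-- Pre_ : every report line splits on " " into exactly [user, reported] with BOTH ids registered.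
-- A raises ValueError/KeyError on malformed lines, unregistered reported ids, and unregistered
-- reporters of banned users; Pre_ additionally excludes unregistered reporters of NON-banned users,
-- on which A still returns — requiring both ids registered is the natural closed-form domain.
def Pre_solution (id_list : List String) (report : List String) (k : Int) : Prop :=
  (report.all (fun cur =>
    match PySem.Str.split? cur " " with
    | some [u, r] => id_list.contains u && id_list.contains r
    | _ => false)) = true
instance (id_list : List String) (report : List String) (k : Int) : Decidable (Pre_solution id_list report k) := by unfold Pre_solution; infer_instance

def pvWitness_solution : List String × List String × Int := (["muzi", "frodo"], ["muzi frodo"], 1)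

def Spec_solution (id_list : List String) (report : List String) (k : Int) (out : List Int) : Prop := out = solution_alt id_list report k
instance (id_list : List String) (report : List String) (k : Int) (out : List Int) : Decidable (Spec_solution id_list report k out) := by unfold Spec_solution; infer_instance

-- ===== CLAIM (what is proved, stated in full; the proofs are below) =====
def Claim_equal_solution : Prop := ∀ (id_list : List String) (report : List String) (k : Int), Dom_solution id_list report k → Pre_solution id_list report k → Spec_solution id_list report k (solution id_list report k)

-- ===== LEMMAS AND PROOFS =====

theorem pv_pre_mem {id_list report : List String} {k : Int}
    (h : Pre_solution id_list report k) {cur : String} (hc : cur ∈ report) :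
    (pvSplit2 cur).1 ∈ id_list ∧ (pvSplit2 cur).2 ∈ id_list := by
  rw [Pre_solution, List.all_eq_true] at h
  have hf := h cur hc
  unfold pvSplit2
  rcases hsp : PySem.Str.split? cur " " with _ | parts
  · simp [hsp] at hf
  · match parts, hsp with
    | [], hsp => simp [hsp] at hf
    | [u], hsp => simp [hsp] at hf
    | [u, r], hsp =>
        simp only [hsp, Bool.and_eq_true, List.contains_iff_mem] at hf
        simpa [hsp] using hf
    | u :: r :: c :: t, hsp => simp [hsp] at hf

-- a fold over a product whose components do not interact splits into two folds
theorem pv_pairfold (l : List String)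
    (d1 : PySem.Dict String (PySem.Set String)) (d2 : PySem.Dict String Int) :
    l.foldl (fun td user => (td.1.insert user PySem.Set.empty, td.2.insert user (0 : Int))) (d1, d2)
      = (l.foldl (fun t user => t.insert user PySem.Set.empty) d1,
         l.foldl (fun t user => t.insert user (0 : Int)) d2) := by
  induction l generalizing d1 d2 with
  | nil => rfl
  | cons x xs ih => simpa [List.foldl] using ih _ _

theorem pv_getD_insertConst {ν : Type} (c : ν) (l : List String) (d : PySem.Dict String ν)
    (x : String) (h : d.getD x c = c) :
    (l.foldl (fun d u => d.insert u c) d).getD x c = c := by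
  induction l generalizing d with
  | nil => exact h
  | cons y ys ih =>
    refine ih _ ?_
    rw [PySem.Dict.getD_insert]
    split_ifs <;> simp [h]

theorem pv_update_subset (xs : List String) (s : PySem.Set String)
    (h : ∀ x ∈ xs, x ∈ s) : PySem.Set.update s xs = s := by
  induction xs generalizing s with
  | nil => rfl
  | cons y ys ih =>
    rw [PySem.Set.update_cons, PySem.Set.add_of_mem (h y (by simp))]
    exact ih s (fun x hx => h x (by simp [hx]))

-- grouping fold: the set stored at key r collects val of exactly the items keyed r
theorem pv_group {β : Type} (key val : β → String) (l : List β)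
    (t : PySem.Dict String (PySem.Set String)) (r : String) :
    (l.foldl (fun t x => t.modify (key x) PySem.Set.empty (fun s => PySem.Set.add s (val x))) t).getD r PySem.Set.empty
      = PySem.Set.update (t.getD r PySem.Set.empty) ((l.filter (fun x => key x == r)).map val) := by
  induction l generalizing t with
  | nil => rfl
  | cons x xs ih =>
    rw [List.foldl_cons, ih, PySem.Dict.getD_modify]
    by_cases h : key x = r
    · simp [h, PySem.Set.update_cons]
    · simp [h, Ne.symm h]

-- A's distribution loop: temp[u] gains, for each banned key, u's multiplicity in that key's set
theorem pv_distribute (keysl : List String) (T : PySem.Dict String (PySem.Set String))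
    (t : PySem.Dict String Int) (k : Int) (u : String) :
    (keysl.foldl (fun tm key =>
      if k ≤ PySem.Set.len (T.getD key PySem.Set.empty) then
        (T.getD key PySem.Set.empty).foldl (fun tm i => tm.modify i 0 (fun x => x + 1)) tm
      else tm) t).getD u 0
      = t.getD u 0 + (keysl.map (fun key =>
          if k ≤ PySem.Set.len (T.getD key PySem.Set.empty)
          then ((T.getD key PySem.Set.empty).count u : Int) else 0)).sum := by
  induction keysl generalizing t with
  | nil => simp
  | cons x xs ih =>
    rw [List.foldl_cons, ih, List.map_cons, List.sum_cons]
    by_cases h : k ≤ PySem.Set.len (T.getD x PySem.Set.empty)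
    · rw [if_pos h, if_pos h, PySem.Dict.getD_foldl_modify_add_one]
      omega
    · rw [if_neg h, if_neg h]; omega

theorem pv_count_nodup {α : Type} [DecidableEq α] (l : List α) (hnd : l.Nodup) (a : α) :
    l.count a = if a ∈ l then 1 else 0 := by
  split_ifs with h
  · exact List.count_eq_one_of_mem hnd h
  · exact List.count_eq_zero_of_not_mem h

-- membership in A's group set at r  ↔  the pair is among the parsed pairs
theorem pv_memA (report : List String) (u r : String) :
    u ∈ PySem.Set.ofList ((report.filter (fun cur => (pvSplit2 cur).2 == r)).map (fun cur => (pvSplit2 cur).1))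
      ↔ (u, r) ∈ report.map (fun cur => pvSplit2 cur) := by
  rw [PySem.Set.mem_ofList]
  constructor
  · intro h
    rcases List.mem_map.mp h with ⟨cur, hcur, h1⟩
    rcases List.mem_filter.mp hcur with ⟨hmem, h2⟩
    refine List.mem_map.mpr ⟨cur, hmem, ?_⟩
    exact Prod.ext h1 (by simpa using h2)
  · intro h
    rcases List.mem_map.mp h with ⟨cur, hmem, hp⟩
    refine List.mem_map.mpr ⟨cur, List.mem_filter.mpr ⟨hmem, by simp [hp]⟩, by simp [hp]⟩

-- two lists without duplicates and with the same members have the same length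
theorem pv_nodup_length_eq {α : Type} (xs ys : List α)
    (hx : xs.Nodup) (hy : ys.Nodup) (h : ∀ a, a ∈ xs ↔ a ∈ ys) :
    xs.length = ys.length :=
  ((List.perm_ext_iff_of_nodup hx hy).mpr h).length_eq

-- on a list whose first components are nondecreasing, the head-key span IS the key's filter
theorem pv_span (r : String) (l : List (String × String))
    (hlb : ∀ a ∈ l, r ≤ a.1) (hpw : l.Pairwise (fun a b => a.1 ≤ b.1)) :
    l.takeWhile (fun q => q.1 == r) = l.filter (fun q => q.1 == r)
    ∧ l.dropWhile (fun q => q.1 == r) = l.filter (fun q => !(q.1 == r)) := by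
  induction l with
  | nil => exact ⟨rfl, rfl⟩
  | cons a t ih =>
    rcases List.pairwise_cons.mp hpw with ⟨hat, hpt⟩
    by_cases ha : a.1 = r
    · have hb : (a.1 == r) = true := by simpa using ha
      have ih' := ih (fun b hb' => hlb b (by simp [hb'])) hpt
      constructor
      · simp [hb, ih'.1]
      · simp [hb, ih'.2]
    · have hlt : r < a.1 := lt_of_le_of_ne (hlb a (by simp)) (Ne.symm ha)
      have hb : (a.1 == r) = false := by simpa using ha
      have htail : ∀ b ∈ t, (b.1 == r) = false := by
        intro b hbt
        have h1 : r < b.1 := lt_of_lt_of_le hlt (hat b hbt)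
        simpa using ne_of_gt h1
      have hfe : t.filter (fun q => q.1 == r) = [] :=
        List.filter_eq_nil_iff.mpr (fun b hbt => by simp [htail b hbt])
      have hfs : t.filter (fun q => !(q.1 == r)) = t :=
        List.filter_eq_self.mpr (fun b hbt => by simp [htail b hbt])
      constructor
      · simp [hb, hfe]
      · simp [hb, hfs]

-- the run-fold keeps the key list when every reporter in the list is already a key
theorem pv_keys_modfold (l : List (String × String)) (d : PySem.Dict String Int)
    (h : ∀ q ∈ l, q.2 ∈ d.keys) :
    (l.foldl (fun d q => d.modify q.2 0 (fun x => x + 1)) d).keys = d.keys := by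
  induction l generalizing d with
  | nil => rfl
  | cons q qs ih =>
    rw [List.foldl_cons]
    have hc : d.contains q.2 = true :=
      (PySem.Dict.contains_iff_mem_keys _ _).mpr (h q (by simp))
    have hkeys : (d.modify q.2 0 (fun x => x + 1)).keys = d.keys := by
      rw [PySem.Dict.keys_modify, PySem.Dict.keys_insert_of_contains _ _ hc]
    rw [ih _ (fun p hp => by rw [hkeys]; exact h p (by simp [hp])), hkeys]

theorem pv_runScan_keys (k : Int) :
    ∀ (n : Nat) (L : List (String × String)) (c : PySem.Dict String Int), L.length ≤ n →
    (∀ q ∈ L, q.2 ∈ c.keys) → (pvRunScan k L c).keys = c.keys := by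
  intro n
  induction n with
  | zero =>
    intro L c hlen _
    have : L = [] := List.length_eq_zero_iff.mp (Nat.le_zero.mp hlen)
    subst this
    simp [pvRunScan]
  | succ n ih =>
    intro L c hlen hmem
    match L with
    | [] => simp [pvRunScan]
    | p :: ps =>
      rw [pvRunScan]
      have hsub1 : ∀ q ∈ (p :: ps).takeWhile (fun q => q.1 == p.1), q ∈ p :: ps :=
        fun q hq => (List.takeWhile_sublist _).subset hq
      have hsub2 : ∀ q ∈ (p :: ps).dropWhile (fun q => q.1 == p.1), q ∈ p :: ps :=
        fun q hq => (List.dropWhile_sublist _).subset hq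
      have hlen' : ((p :: ps).dropWhile (fun q => q.1 == p.1)).length ≤ n := by
        have h1 : (p :: ps).dropWhile (fun q => q.1 == p.1) = ps.dropWhile (fun q => q.1 == p.1) := by
          simp
        rw [h1]
        exact Nat.le_trans (List.length_dropWhile_le _ _) (by simpa using hlen)
      by_cases hk : k ≤ (((p :: ps).takeWhile (fun q => q.1 == p.1)).length : Int)
      · rw [if_pos hk]
        have hkeq : ((((p :: ps).takeWhile (fun q => q.1 == p.1)).foldl
            (fun d q => d.modify q.2 0 (fun x => x + 1)) c)).keys = c.keys :=
          pv_keys_modfold _ _ (fun q hq => hmem q (hsub1 q hq))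
        rw [ih _ _ hlen' (fun q hq => by rw [hkeq]; exact hmem q (hsub2 q hq)), hkeq]
      · rw [if_neg hk]
        exact ih _ _ hlen' (fun q hq => hmem q (hsub2 q hq))

-- a 0/1 sum over a duplicate-free index list is the cardinality of the filtered index set
theorem pv_sum_ite_card (I : List String) (hnd : I.Nodup) (P : String → Prop) [DecidablePred P] :
    (I.map (fun r => if P r then (1 : Int) else 0)).sum = ((I.toFinset.filter P).card : Int) := by
  induction I with
  | nil => simp
  | cons a t ih =>
    rcases List.nodup_cons.mp hnd with ⟨hna, hnt⟩
    have hnaF : a ∉ t.toFinset := by simpa using hna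
    rw [List.map_cons, List.sum_cons, ih hnt, List.toFinset_cons, Finset.filter_insert]
    by_cases hP : P a
    · rw [if_pos hP, if_pos hP,
        Finset.card_insert_of_notMem (fun hc => hnaF (Finset.mem_of_mem_filter _ hc))]
      push_cast; ring
    · rw [if_neg hP, if_neg hP]; ring

-- the sweep's per-reporter total: one for every key whose run reaches k and contains the reporter
theorem pv_runScan_getD (k : Int) (u : String) :
    ∀ (n : Nat) (L : List (String × String)) (c : PySem.Dict String Int), L.length ≤ n →
    L.Nodup → L.Pairwise (fun a b => a.1 ≤ b.1) →
    (pvRunScan k L c).getD u 0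
      = c.getD u 0 + ((((L.map Prod.fst).toFinset.filter
          (fun r => k ≤ (L.countP (fun q => q.1 == r) : Int) ∧ (r, u) ∈ L)).card : Int)) := by
  intro n
  induction n with
  | zero =>
    intro L c hlen _ _
    have : L = [] := List.length_eq_zero_iff.mp (Nat.le_zero.mp hlen)
    subst this
    simp [pvRunScan]
  | succ n ih =>
    intro L c hlen hnd hpw
    match L with
    | [] => simp [pvRunScan]
    | p :: ps =>
      rw [pvRunScan]
      have hlb : ∀ a ∈ p :: ps, p.1 ≤ a.1 := by
        intro a ha
        rcases List.mem_cons.mp ha with rfl | ha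
        · exact le_refl _
        · exact (List.pairwise_cons.mp hpw).1 a ha
      obtain ⟨htw, hdw⟩ := pv_span p.1 (p :: ps) hlb hpw
      set L0 := p :: ps with hL0
      set run := L0.filter (fun q => q.1 == p.1) with hrun
      set rest := L0.filter (fun q => !(q.1 == p.1)) with hrest
      rw [htw, hdw]
      -- facts about run and rest
      have hrest_nd : rest.Nodup := hnd.filter _
      have hrest_pw : rest.Pairwise (fun a b => a.1 ≤ b.1) := hpw.sublist List.filter_sublist
      have hrest_len : rest.length ≤ n := by
        have := List.length_dropWhile_le (fun q => q.1 == p.1) ps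
        have hdw' : L0.dropWhile (fun q => q.1 == p.1) = ps.dropWhile (fun q => q.1 == p.1) := by
          simp [hL0]
        rw [← hdw, hdw']
        exact Nat.le_trans this (by simpa [hL0] using hlen)
      have happ : run ++ rest = L0 := by rw [← htw, ← hdw]; exact List.takeWhile_append_dropWhile
      have hrun_fst : ∀ q ∈ run, q.1 = p.1 := by
        intro q hq
        have := (List.mem_filter.mp hq).2
        simpa using this
      have hrest_fst : ∀ q ∈ rest, q.1 ≠ p.1 := by
        intro q hq
        have := (List.mem_filter.mp hq).2
        simpa using this
      -- length of the run is the head key's multiplicity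
      have hcntL : ∀ r : String, L0.countP (fun q => q.1 == r) =
          run.countP (fun q => q.1 == r) + rest.countP (fun q => q.1 == r) := by
        intro r; rw [← happ, List.countP_append]
      have hcnt_run_p : run.countP (fun q => q.1 == p.1) = run.length :=
        List.countP_eq_length.mpr (fun q hq => by simp [hrun_fst q hq])
      have hcnt_rest_p : rest.countP (fun q => q.1 == p.1) = 0 :=
        List.countP_eq_zero.mpr (fun q hq => by simp [hrest_fst q hq])
      have hcnt_run_ne : ∀ r : String, r ≠ p.1 → run.countP (fun q => q.1 == r) = 0 := by
        intro r hr
        exact List.countP_eq_zero.mpr (fun q hq => by simp [hrun_fst q hq, Ne.symm hr])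
      have hmemL : ∀ q : String × String, q ∈ L0 ↔ q ∈ run ∨ q ∈ rest := by
        intro q; rw [← happ]; exact List.mem_append
      have hmem_run : ∀ v : String, (p.1, v) ∈ run ↔ (p.1, v) ∈ L0 := by
        intro v
        rw [hmemL]
        constructor
        · exact Or.inl
        · rintro (h | h)
          · exact h
          · exact absurd rfl (hrest_fst (p.1, v) h)
      have hmem_rest : ∀ (r v : String), r ≠ p.1 → ((r, v) ∈ rest ↔ (r, v) ∈ L0) := by
        intro r v hr
        rw [hmemL]
        constructor
        · exact Or.inr
        · rintro (h | h)
          · exact absurd (hrun_fst _ h) hr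
          · exact h
      -- the key-set splits off the head key
      have hkeyset : (L0.map Prod.fst).toFinset = insert p.1 (rest.map Prod.fst).toFinset := by
        ext r
        simp only [Finset.mem_insert, List.mem_toFinset, List.mem_map]
        constructor
        · rintro ⟨q, hq, rfl⟩
          by_cases hqe : q.1 = p.1
          · exact Or.inl hqe
          · rcases (hmemL q).mp hq with h | h
            · exact absurd (hrun_fst q h) hqe
            · exact Or.inr ⟨q, h, rfl⟩
        · rintro (rfl | ⟨q, hq, rfl⟩)
          · exact ⟨p, by simp [hL0], rfl⟩
          · exact ⟨q, (hmemL q).mpr (Or.inr hq), rfl⟩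
      have hp_notin : p.1 ∉ (rest.map Prod.fst).toFinset := by
        simp only [List.mem_toFinset, List.mem_map]
        rintro ⟨q, hq, hq1⟩
        exact hrest_fst q hq hq1
      -- predicates agree on the remaining keys
      have hfilter_eq : ((rest.map Prod.fst).toFinset.filter
            (fun r => k ≤ (L0.countP (fun q => q.1 == r) : Int) ∧ (r, u) ∈ L0))
          = ((rest.map Prod.fst).toFinset.filter
            (fun r => k ≤ (rest.countP (fun q => q.1 == r) : Int) ∧ (r, u) ∈ rest)) := by
        refine Finset.filter_congr (fun r hr => ?_)
        have hrne : r ≠ p.1 := fun hc => hp_notin (hc ▸ hr)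
        rw [hcntL r, hcnt_run_ne r hrne, Nat.zero_add, hmem_rest r u hrne]
      -- the run's fold adds 1 exactly when the head key's group contains u
      have hrun_snd_nd : (run.map Prod.snd).Nodup := by
        refine (hnd.filter _).map_on ?_
        intro x hx y hy hxy
        exact Prod.ext (by rw [hrun_fst x hx, hrun_fst y hy]) hxy
      have hmem_snd : u ∈ run.map Prod.snd ↔ (p.1, u) ∈ L0 := by
        rw [← hmem_run u, List.mem_map]
        constructor
        · rintro ⟨q, hq, rfl⟩
          have : q = (p.1, q.2) := Prod.ext (hrun_fst q hq) rfl
          exact this ▸ hq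
        · intro h
          exact ⟨(p.1, u), h, rfl⟩
      have hcount : ((run.map Prod.snd).count u : Int) = if (p.1, u) ∈ L0 then 1 else 0 := by
        rw [pv_count_nodup _ hrun_snd_nd u]
        by_cases h : (p.1, u) ∈ L0
        · rw [if_pos (hmem_snd.mpr h), if_pos h]; simp
        · rw [if_neg (fun hc => h (hmem_snd.mp hc)), if_neg h]; simp
      -- assemble
      have hPredp : (k ≤ (L0.countP (fun q => q.1 == p.1) : Int) ∧ (p.1, u) ∈ L0)
          ↔ (k ≤ (run.length : Int) ∧ (p.1, u) ∈ L0) := by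
        rw [hcntL p.1, hcnt_run_p, hcnt_rest_p]
        simp
      rw [hkeyset, Finset.filter_insert]
      by_cases hk : k ≤ (run.length : Int)
      · rw [if_pos hk]
        have hfold : ((run.foldl (fun d q => d.modify q.2 0 (fun x => x + 1)) c)).getD u 0
            = c.getD u 0 + ((run.map Prod.snd).count u : Int) := by
          rw [← List.foldl_map (f := Prod.snd)
              (g := fun (d : PySem.Dict String Int) x => d.modify x 0 (fun y => y + 1)),
            PySem.Dict.getD_foldl_modify_add_one]
        rw [ih rest (run.foldl (fun d q => d.modify q.2 0 (fun x => x + 1)) c)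
            hrest_len hrest_nd hrest_pw, hfold, hcount]
        by_cases hmem : (p.1, u) ∈ L0
        · rw [if_pos (hPredp.mpr ⟨hk, hmem⟩), hfilter_eq,
            Finset.card_insert_of_notMem (fun hc => hp_notin (Finset.mem_of_mem_filter _ hc)),
            if_pos hmem]
          push_cast; ring
        · rw [if_neg (fun hc => hmem (hPredp.mp hc).2), hfilter_eq, if_neg hmem]
          ring
      · rw [if_neg hk]
        rw [ih rest c hrest_len hrest_nd hrest_pw,
          if_neg (fun hc => hk (hPredp.mp hc).1), hfilter_eq]

-- ===== VERDICT (by name: the statement is the Claim_ definition above) =====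
set_option maxHeartbeats 4000000 in
theorem solution_spec : Claim_equal_solution := by
  intro ids report k _hdom hpre
  show solution ids report k = solution_alt ids report k
  have hpre2 : ∀ {cur : String}, cur ∈ report → (pvSplit2 cur).1 ∈ ids ∧ (pvSplit2 cur).2 ∈ ids :=
    fun hc => pv_pre_mem hpre hc
  unfold solution solution_alt
  simp only [pv_pairfold]
  set S := PySem.Set.ofList (report.map (fun cur => pvSplit2 cur)) with hS
  set L := PySem.List.sorted (S.map (fun p => (p.2, p.1))) (fun p => p.1) with hL
  set t0 := List.foldl (fun t user => t.insert user PySem.Set.empty) PySem.Dict.empty ids with ht0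
  set c0 := List.foldl (fun t user => t.insert user (0 : Int)) PySem.Dict.empty ids with hc0
  set tbl := List.foldl (fun t cur =>
    t.modify (pvSplit2 cur).2 PySem.Set.empty fun s => PySem.Set.add s (pvSplit2 cur).1) t0 report with htbl
  -- the common facts
  have hndS : S.Nodup := PySem.Set.nodup_ofList _
  have hmemS : ∀ q : String × String, q ∈ S ↔ q ∈ report.map (fun cur => pvSplit2 cur) :=
    fun q => PySem.Set.mem_ofList _ _
  have hmemS_ids : ∀ q ∈ S, q.1 ∈ ids ∧ q.2 ∈ ids := by
    intro q hq
    rcases List.mem_map.mp ((hmemS q).mp hq) with ⟨cur, hcur, rfl⟩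
    exact hpre2 hcur
  have hpermL : L.Perm (S.map (fun p => (p.2, p.1))) := PySem.List.sorted_perm _ _ _
  have hndL : L.Nodup := by
    refine hpermL.nodup_iff.mpr (hndS.map_on ?_)
    intro x _ y _ hxy
    exact Prod.ext (congrArg Prod.snd hxy) (congrArg Prod.fst hxy)
  have hpwL : L.Pairwise (fun a b => a.1 ≤ b.1) := PySem.List.sorted_pairwise _ _
  have hmemL : ∀ (r v : String), (r, v) ∈ L ↔ (v, r) ∈ S := by
    intro r v
    rw [hpermL.mem_iff, List.mem_map]
    constructor
    · rintro ⟨q, hq, hqe⟩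
      have h1 : q.2 = r := congrArg Prod.fst hqe
      have h2 : q.1 = v := congrArg Prod.snd hqe
      have : q = (v, r) := Prod.ext h2 h1
      exact this ▸ hq
    · intro h
      exact ⟨(v, r), h, rfl⟩
  have hcntLS : ∀ r : String, L.countP (fun q => q.1 == r) = S.countP (fun q => q.2 == r) := by
    intro r
    rw [hpermL.countP_eq, List.countP_map]
    rfl
  -- key sets
  have hkt0 : t0.keys = PySem.Set.ofList ids := by
    rw [ht0, PySem.Dict.keys_foldl_insert, PySem.Dict.keys_empty, PySem.Set.update_nil_left]
  have hkc0 : c0.keys = PySem.Set.ofList ids := by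
    rw [hc0, PySem.Dict.keys_foldl_insert, PySem.Dict.keys_empty, PySem.Set.update_nil_left]
  have hktbl : tbl.keys = PySem.Set.ofList ids := by
    rw [htbl, PySem.Dict.keys_foldl_modify_key, hkt0]
    refine pv_update_subset _ _ (fun x hx => ?_)
    rcases List.mem_map.mp hx with ⟨cur, hcur, rfl⟩
    exact (PySem.Set.mem_ofList _ _).mpr (hpre2 hcur).2
  have hndI : (PySem.Set.ofList ids).Nodup := PySem.Set.nodup_ofList ids
  have hmemI : ∀ r : String, r ∈ PySem.Set.ofList ids ↔ r ∈ ids :=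
    fun r => PySem.Set.mem_ofList _ _
  -- contents of A's table
  have hgt0 : ∀ r, t0.getD r PySem.Set.empty = PySem.Set.empty := by
    intro r
    rw [ht0]
    exact pv_getD_insertConst _ _ _ _ (PySem.Dict.getD_empty _ _)
  have hgt : ∀ r, tbl.getD r PySem.Set.empty
      = PySem.Set.ofList ((report.filter (fun cur => (pvSplit2 cur).2 == r)).map (fun cur => (pvSplit2 cur).1)) := by
    intro r
    rw [htbl, pv_group, hgt0, PySem.Set.update_empty]
  have h00 : ∀ x, c0.getD x 0 = 0 := fun x => by
    rw [hc0]; exact pv_getD_insertConst _ _ _ _ (PySem.Dict.getD_empty _ _)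
  -- A's group at r: membership and size against S
  have hGmem : ∀ (r v : String), v ∈ tbl.getD r PySem.Set.empty ↔ (v, r) ∈ S := by
    intro r v
    rw [hgt r, pv_memA, hmemS]
  have hGlen : ∀ r : String, PySem.Set.len (tbl.getD r PySem.Set.empty)
      = (S.countP (fun q => q.2 == r) : Int) := by
    intro r
    rw [List.countP_eq_length_filter]
    have hnd1 : (tbl.getD r PySem.Set.empty).Nodup := by rw [hgt r]; exact PySem.Set.nodup_ofList _
    have hnd2 : ((S.filter (fun q => q.2 == r)).map Prod.fst).Nodup := by
      refine (hndS.filter _).map_on ?_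
      intro x hx y hy hxy
      have hx2 : x.2 = r := by simpa using (List.mem_filter.mp hx).2
      have hy2 : y.2 = r := by simpa using (List.mem_filter.mp hy).2
      exact Prod.ext hxy (hx2.trans hy2.symm)
    have hmm : ∀ v, v ∈ tbl.getD r PySem.Set.empty ↔ v ∈ (S.filter (fun q => q.2 == r)).map Prod.fst := by
      intro v
      rw [hGmem r v, List.mem_map]
      constructor
      · intro h
        exact ⟨(v, r), List.mem_filter.mpr ⟨h, by simp⟩, rfl⟩
      · rintro ⟨q, hq, rfl⟩
        have hq2 : q.2 = r := by simpa using (List.mem_filter.mp hq).2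
        have : q = (q.1, r) := Prod.ext rfl hq2
        exact this ▸ (List.mem_filter.mp hq).1
    have := pv_nodup_length_eq _ _ hnd1 hnd2 hmm
    simp only [PySem.Set.len]
    rw [this, List.length_map]
  -- B's key list covers counts0's keys
  have hLkeys : ∀ q ∈ L, q.2 ∈ c0.keys := by
    intro q hq
    have : (q.2, q.1) ∈ S := by
      have h1 := (hmemL q.1 q.2).mp (by exact hq)
      exact h1
    rw [hkc0, hmemI]
    exact (hmemS_ids _ this).1
  -- evaluate both sides as maps over the distinct id list
  rw [hktbl]
  rw [PySem.List.foldl_append_singleton_eq_map, List.nil_append]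
  rw [PySem.Dict.values_eq_map_keys _ (by rw [pv_runScan_keys k L.length L c0 (le_refl _) hLkeys, hkc0]; exact hndI) 0]
  rw [pv_runScan_keys k L.length L c0 (le_refl _) hLkeys, hkc0]
  refine List.map_congr_left (fun u hu => ?_)
  rw [pv_distribute, h00, Int.zero_add,
    pv_runScan_getD k u L.length L c0 (le_refl _) hndL hpwL, h00, Int.zero_add]
  -- the left sum is a filtered-card too
  have hterm : ∀ r ∈ PySem.Set.ofList ids,
      (if k ≤ PySem.Set.len (tbl.getD r PySem.Set.empty)
       then ((tbl.getD r PySem.Set.empty).count u : Int) else 0)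
      = if (k ≤ (S.countP (fun q => q.2 == r) : Int) ∧ (u, r) ∈ S) then (1 : Int) else 0 := by
    intro r _
    rw [hGlen r]
    by_cases h1 : k ≤ (S.countP (fun q => q.2 == r) : Int)
    · rw [if_pos h1]
      have hndG : (tbl.getD r PySem.Set.empty).Nodup := by rw [hgt r]; exact PySem.Set.nodup_ofList _
      rw [pv_count_nodup _ hndG u]
      by_cases h2 : (u, r) ∈ S
      · rw [if_pos ((hGmem r u).mpr h2), if_pos ⟨h1, h2⟩]
        simp
      · rw [if_neg (fun hc => h2 ((hGmem r u).mp hc)), if_neg (fun hc => h2 hc.2)]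
        simp
    · rw [if_neg h1, if_neg (fun hc => h1 hc.1)]
  rw [List.map_congr_left hterm, pv_sum_ite_card _ hndI]
  -- the two filtered key sets coincide
  congr 1
  congr 1
  ext r
  simp only [Finset.mem_filter, List.mem_toFinset, List.mem_map]
  constructor
  · rintro ⟨hrI, hcnt, hmem⟩
    refine ⟨⟨(r, u), (hmemL r u).mpr hmem, rfl⟩, ?_, (hmemL r u).mpr hmem⟩
    rw [hcntLS r]; exact hcnt
  · rintro ⟨⟨q, hq, rfl⟩, hcnt, hmem⟩
    have hmem' : (u, q.1) ∈ S := (hmemL q.1 u).mp hmem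
    refine ⟨?_, ?_, hmem'⟩
    · rw [hmemI]
      exact (hmemS_ids _ hmem').2
    · rw [← hcntLS q.1]; exact hcnt
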